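-- pv_equiv track=rewrite | github.com/Anup-repo/DSA-Playground | DynamicProgramming/Striver SDE/partition_count_with_diff_d.py | countPartitionsBottomUp
-- ===== SOURCE A (Python) =====
-- def countPartitionsBottomUp(arr, d):
--     mod = 10 ** 9 + 7
--     n = len(arr)
--     total_sum = sum(arr)
--     if total_sum - d < 0 or (total_sum - d) % 2 != 0:
--         return 0
--     s2 = (total_sum - d) // 2
--     dp = [[0] * (s2 + 1) for _ in range(n)]
--
--     if arr[0] == 0:
--         dp[0][0] = 2
--     else:
--         dp[0][0] = 1
--
--     if arr[0] != 0 and arr[0] <= s2: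
--         dp[0][arr[0]] = 1
--
--     for i in range(1, n):
--         # why from 0 to sum + 1?
--         # because we want to include sum 0
--         for target in range(s2 + 1):
--             # Don't pick current element
--             not_pick = dp[i - 1][target]
--
--             # Pick current element (if possible)
--             pick = 0
--             if arr[i] <= target:
--                 pick = dp[i - 1][target - arr[i]]
--
--             dp[i][target] = (pick + not_pick) % mod
--
--     return dp[n - 1][s2]
-- ===== SOURCE B (Python) =====
-- def countPartitionsBottomUp(arr, d):
--     mod = 10 ** 9 + 7
--     total_sum = sum(arr)
--     if total_sum - d < 0 or (total_sum - d) % 2 != 0: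
--         return 0
--     s2 = (total_sum - d) // 2
--     # Top-down memoization, evaluated iteratively: first propagate the demanded
--     # targets of the recurrence backward from the single top query (last level, s2),
--     # then evaluate the recurrence only on those demanded states.
--     need = [{s2}]
--     for x in reversed(arr[1:]):
--         cur = need[-1]
--         prev = set(cur)
--         for t in cur:
--             if x <= t:
--                 prev.add(t - x)
--         need.append(prev)
--     need.reverse()
--     a0 = arr[0]
--     vals = {}
--     for t in need[0]:
--         if a0 == 0:
--             vals[t] = 2 if t == 0 else 0
--         else:
--             vals[t] = 1 if t == 0 or t == a0 else 0
--     for x, ts in zip(arr[1:], need[1:]):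
--         vals = {t: (vals[t] + (vals[t - x] if x <= t else 0)) % mod for t in ts}
--     return vals[s2]
-- ===== Notes on version B (the rewrite author's own statement) =====
-- stated objective: alternative
-- what changed: Replaces A's dense n x (s2+1) bottom-up table with top-down memoization evaluated iteratively: a backward pass propagates the set of demanded targets from the single top query (level n-1, s2) down to level 0, then a sparse forward pass evaluates the recurrence only on those demanded states.
-- outside the precondition, e.g. on countPartitionsBottomUp([-1, 3], 0): A returns 1, B returns 0
import Mathlib
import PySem

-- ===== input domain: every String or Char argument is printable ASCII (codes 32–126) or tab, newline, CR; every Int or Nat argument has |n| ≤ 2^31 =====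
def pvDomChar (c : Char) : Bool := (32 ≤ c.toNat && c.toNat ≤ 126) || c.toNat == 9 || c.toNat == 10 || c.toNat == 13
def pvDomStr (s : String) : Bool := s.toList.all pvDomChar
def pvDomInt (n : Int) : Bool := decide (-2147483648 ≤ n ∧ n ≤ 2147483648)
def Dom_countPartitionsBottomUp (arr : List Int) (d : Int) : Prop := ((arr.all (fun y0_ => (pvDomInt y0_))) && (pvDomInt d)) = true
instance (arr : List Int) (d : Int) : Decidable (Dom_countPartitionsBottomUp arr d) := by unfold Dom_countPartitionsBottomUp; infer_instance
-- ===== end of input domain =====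

-- B replaces A's dense n×(s2+1) bottom-up table by top-down memoization evaluated
-- iteratively: a backward pass propagating the demanded targets from the single top
-- query, then a sparse forward evaluation over only the demanded states
-- (objective: alternative algorithmic structure).

-- ===== PORT A =====
-- xs[i] (valid index inside Pre_; default 0 outside)
def pvGetI (xs : List Int) (i : Int) : Int := PySem.List.pyGetD xs i 0
-- Array versions of Python's xs[i] / xs[i] = v (the dp table): exact on in-range indices
-- including Python's negative-index rule; out-of-range (IndexError, excluded by Pre_) gives
-- the default / a no-op.  Arrays are used so the port evaluates in the same O(n*s2) as the Python.
def pvAGetD {α : Type} (xs : Array α) (i : Int) (d : α) : α :=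
  let j := if i < 0 then i + xs.size else i
  if h : 0 ≤ j ∧ j.toNat < xs.size then xs[j.toNat]'h.2 else d
def pvASetD {α : Type} (xs : Array α) (i : Int) (v : α) : Array α :=
  let j := if i < 0 then i + xs.size else i
  if 0 ≤ j ∧ j.toNat < xs.size then xs.setIfInBounds j.toNat v else xs

def countPartitionsBottomUp (arr : List Int) (d : Int) : Int :=
  let md : Int := 10 ^ 9 + 7
  let n : Int := (arr.length : Int)
  let total_sum : Int := arr.sum
  if total_sum - d < 0 ∨ PySem.Int.mod (total_sum - d) 2 ≠ 0 then 0
  else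
    let s2 : Int := PySem.Int.floordiv (total_sum - d) 2
    let dp0 : Array (Array Int) := Array.replicate n.toNat (Array.replicate (s2 + 1).toNat 0)
    let dp1 : Array (Array Int) :=
      pvASetD dp0 0 (pvASetD (pvAGetD dp0 0 #[]) 0 (if pvGetI arr 0 = 0 then 2 else 1))
    let dp2 : Array (Array Int) :=
      if pvGetI arr 0 ≠ 0 ∧ pvGetI arr 0 ≤ s2 then
        pvASetD dp1 0 (pvASetD (pvAGetD dp1 0 #[]) (pvGetI arr 0) 1)
      else dp1
    let dpF : Array (Array Int) :=
      (PySem.List.pyRange 1 n 1).foldl (fun dp i =>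
        pvASetD dp i
          ((PySem.List.pyRange 0 (s2 + 1) 1).foldl (fun row target =>
            let not_pick := pvAGetD (pvAGetD dp (i - 1) #[]) target 0
            let pick := if pvGetI arr i ≤ target then pvAGetD (pvAGetD dp (i - 1) #[]) (target - pvGetI arr i) 0 else 0
            pvASetD row target (PySem.Int.mod (pick + not_pick) md))
          (pvAGetD dp i #[]))) dp2
    pvAGetD (pvAGetD dpF (n - 1) #[]) s2 0

-- ===== PORT B =====
-- the Python appends levels to `need` reading need[-1] and reverses at the end;
-- transcribed as cons-at-head reading the head (the same list, built mirror-wise,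
-- so the final reverse is already done)
def countPartitionsBottomUp_alt (arr : List Int) (d : Int) : Int :=
  let md : Int := 10 ^ 9 + 7
  let total_sum : Int := arr.sum
  if total_sum - d < 0 ∨ PySem.Int.mod (total_sum - d) 2 ≠ 0 then 0
  else
    let s2 : Int := PySem.Int.floordiv (total_sum - d) 2
    let need : List (PySem.Set Int) :=
      ((PySem.List.slice arr (some 1) none).reverse).foldl
        (fun need x =>
          ((need.headD []).foldl (fun prev t => if x ≤ t then PySem.Set.add prev (t - x) else prev)
            (need.headD [])) :: need)
        [PySem.Set.ofList [s2]]
    let a0 : Int := PySem.List.pyGetD arr 0 0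
    let vals0 : PySem.Dict Int Int :=
      (need.headD []).foldl
        (fun vals t =>
          vals.insert t (if a0 = 0 then (if t = 0 then (2 : Int) else 0) else (if t = 0 ∨ t = a0 then 1 else 0)))
        PySem.Dict.empty
    let valsF : PySem.Dict Int Int :=
      ((PySem.List.slice arr (some 1) none).zip (need.drop 1)).foldl
        (fun vals xts =>
          xts.2.foldl
            (fun nv t =>
              nv.insert t (PySem.Int.mod (vals.getD t 0 + (if xts.1 ≤ t then vals.getD (t - xts.1) 0 else 0)) md))
            PySem.Dict.empty)
        vals0
    valsF.getD s2 0

-- ===== PRECONDITION & SPEC =====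
-- Pre_ admits every input where the early guard returns 0 and otherwise the natural domain of
-- this subset-count DP: a nonempty array of nonnegative elements.  When the guard does not fire,
-- Pre_ excludes empty arrays (A raises IndexError at arr[0]) and arrays containing a negative
-- element, on which A either raises IndexError or returns an accidental value through Python
-- negative-index wraparound.
def Pre_countPartitionsBottomUp (arr : List Int) (d : Int) : Prop :=
  (arr.sum - d < 0 ∨ PySem.Int.mod (arr.sum - d) 2 ≠ 0) ∨ (arr ≠ [] ∧ ∀ x ∈ arr, 0 ≤ x)
instance (arr : List Int) (d : Int) : Decidable (Pre_countPartitionsBottomUp arr d) := by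
  unfold Pre_countPartitionsBottomUp; infer_instance

def pvWitness_countPartitionsBottomUp : List Int × Int := ([1, 2, 3], 0)

def Spec_countPartitionsBottomUp (arr : List Int) (d : Int) (out : Int) : Prop := out = countPartitionsBottomUp_alt arr d
instance (arr : List Int) (d : Int) (out : Int) : Decidable (Spec_countPartitionsBottomUp arr d out) := by unfold Spec_countPartitionsBottomUp; infer_instance

-- ===== CLAIM (what is proved, stated in full; the proofs are below) =====
def Claim_equal_countPartitionsBottomUp : Prop := ∀ (arr : List Int) (d : Int), Dom_countPartitionsBottomUp arr d → Pre_countPartitionsBottomUp arr d → Spec_countPartitionsBottomUp arr d (countPartitionsBottomUp arr d)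

-- ===== LEMMAS AND PROOFS =====

-- the common mathematical recurrence: Wcount p t = number of subsets of p summing to t (mod 1e9+7),
-- peeling the MOST RECENTLY processed element (so both programs reach Wcount arr.reverse)
def Wcount : List Int → Int → Int
  | [], t => if t = 0 then 1 else 0
  | x :: p, t => PySem.Int.mod ((if x ≤ t then Wcount p (t - x) else 0) + Wcount p t) (10 ^ 9 + 7)

theorem mod_id_of_bounds {a : Int} (h0 : 0 ≤ a) (h1 : a < 10 ^ 9 + 7) :
    PySem.Int.mod a (10 ^ 9 + 7) = a := by
  rw [PySem.Int.mod_eq_emod_of_pos (by norm_num)]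
  exact Int.emod_eq_of_lt h0 h1

-- ---- B-side: demanded-target chains ----

def linkOK (x : Int) (n0 n1 : List Int) : Prop :=
  ∀ t ∈ n1, t ∈ n0 ∧ (x ≤ t → t - x ∈ n0)

def ChainP : List Int → List (List Int) → Prop
  | [], ns => ns.length = 1
  | x :: xs, n0 :: n1 :: rest => linkOK x n0 n1 ∧ ChainP xs (n1 :: rest)
  | _ :: _, _ => False

theorem ChainP_nil (ns : List (List Int)) : ChainP [] ns ↔ ns.length = 1 := by simp [ChainP]

theorem ChainP_cons_cons (x : Int) (xs : List Int) (n0 n1 : List Int) (rest : List (List Int)) :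
    ChainP (x :: xs) (n0 :: n1 :: rest) ↔ linkOK x n0 n1 ∧ ChainP xs (n1 :: rest) := by simp [ChainP]

theorem ChainP_cons_sing (x : Int) (xs : List Int) (n0 : List Int) :
    ¬ ChainP (x :: xs) [n0] := by simp [ChainP]

-- value lookup in a fold of fixed-function inserts
theorem getD_foldl_insertg (g : Int → Int) :
    ∀ (L : List Int) (dct : PySem.Dict Int Int) (t : Int),
    (L.foldl (fun nv u => nv.insert u (g u)) dct).getD t 0
      = if t ∈ L then g t else dct.getD t 0 := by
  intro L
  induction L with
  | nil => intro dct t; simp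
  | cons u L ih =>
    intro dct t
    simp only [List.foldl_cons]
    rw [ih]
    by_cases hL : t ∈ L
    · rw [if_pos hL, if_pos (List.mem_cons_of_mem _ hL)]
    · rw [if_neg hL, PySem.Dict.getD_insert]
      by_cases hu : t = u
      · subst hu; rw [if_pos rfl, if_pos List.mem_cons_self]
      · rw [if_neg hu, if_neg (by simp [List.mem_cons, hu, hL])]

-- membership facts about the backward shift-fold
theorem mem_shiftfold_of_mem (x u : Int) :
    ∀ (L p : List Int), u ∈ p →
    u ∈ L.foldl (fun prev t => if x ≤ t then PySem.Set.add prev (t - x) else prev) p := by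
  intro L
  induction L with
  | nil => intro p hp; simpa using hp
  | cons t L ih =>
    intro p hp
    simp only [List.foldl_cons]
    apply ih
    split
    · exact (PySem.Set.mem_add _ _ _).mpr (Or.inl hp)
    · exact hp

theorem shift_mem_shiftfold (x u : Int) :
    ∀ (L p : List Int), u ∈ L → x ≤ u →
    u - x ∈ L.foldl (fun prev t => if x ≤ t then PySem.Set.add prev (t - x) else prev) p := by
  intro L
  induction L with
  | nil => intro p hp; simp at hp
  | cons t L ih =>
    intro p hu hx
    simp only [List.foldl_cons]
    rcases List.mem_cons.mp hu with h | h
    · subst h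
      rw [if_pos hx]
      exact mem_shiftfold_of_mem x (u - x) L _ ((PySem.Set.mem_add _ _ _).mpr (Or.inr rfl))
    · exact ih _ h hx

theorem link_shiftfold (x : Int) (cur : List Int) :
    linkOK x (cur.foldl (fun prev t => if x ≤ t then PySem.Set.add prev (t - x) else prev) cur) cur := by
  intro t ht
  exact ⟨mem_shiftfold_of_mem x t cur cur ht, fun hx => shift_mem_shiftfold x t cur cur ht hx⟩

-- the backward pass produces a demanded-target chain and keeps the top level last
theorem bwd :
    ∀ (ys zs : List Int) (acc : List (List Int)), acc ≠ [] → ChainP zs acc →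
    ChainP (ys.reverse ++ zs)
      (ys.foldl (fun need x =>
          ((need.headD []).foldl (fun prev t => if x ≤ t then PySem.Set.add prev (t - x) else prev)
            (need.headD [])) :: need) acc)
    ∧ (ys.foldl (fun need x =>
          ((need.headD []).foldl (fun prev t => if x ≤ t then PySem.Set.add prev (t - x) else prev)
            (need.headD [])) :: need) acc) ≠ []
    ∧ (ys.foldl (fun need x =>
          ((need.headD []).foldl (fun prev t => if x ≤ t then PySem.Set.add prev (t - x) else prev)
            (need.headD [])) :: need) acc).getLastD []
        = acc.getLastD [] := by
  intro ys
  induction ys with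
  | nil => intro zs acc hne hch; exact ⟨by simpa using hch, hne, rfl⟩
  | cons y ys ih =>
    intro zs acc hne hch
    obtain ⟨cur, rest, rfl⟩ := List.exists_cons_of_ne_nil hne
    simp only [List.foldl_cons, List.headD_cons]
    have hch' : ChainP (y :: zs)
        ((cur.foldl (fun prev t => if y ≤ t then PySem.Set.add prev (t - y) else prev) cur) :: cur :: rest) :=
      (ChainP_cons_cons _ _ _ _ _).mpr ⟨link_shiftfold y cur, hch⟩
    obtain ⟨h1, h2, h3⟩ := ih (y :: zs) _ (by simp) hch'
    refine ⟨?_, h2, ?_⟩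
    · simpa [List.append_assoc] using h1
    · rw [h3]
      simp

-- base row: the seeding formula equals Wcount on the singleton list (any target, 0 ≤ a0)
theorem base_eq (a0 : Int) (ha : 0 ≤ a0) (t : Int) :
    (if a0 = 0 then (if t = 0 then (2 : Int) else 0) else (if t = 0 ∨ t = a0 then 1 else 0))
      = Wcount [a0] t := by
  rw [show Wcount [a0] t
      = PySem.Int.mod ((if a0 ≤ t then (if t - a0 = 0 then (1 : Int) else 0) else 0)
          + (if t = 0 then 1 else 0)) (10 ^ 9 + 7) from rfl]
  rw [mod_id_of_bounds (by split_ifs <;> norm_num) (by split_ifs <;> norm_num)]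
  split_ifs <;> omega

-- the sparse forward evaluation follows the recurrence along the chain
theorem fwd_all :
    ∀ (xs : List Int) (ns : List (List Int)) (n0 : List Int) (vals : PySem.Dict Int Int) (p : List Int),
    ChainP xs (n0 :: ns) → (∀ t ∈ n0, vals.getD t 0 = Wcount p t) →
    ∀ t ∈ (n0 :: ns).getLastD [],
    ((xs.zip ns).foldl
        (fun vals xts =>
          xts.2.foldl
            (fun nv t =>
              nv.insert t (PySem.Int.mod (vals.getD t 0 + (if xts.1 ≤ t then vals.getD (t - xts.1) 0 else 0)) (10 ^ 9 + 7)))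
            PySem.Dict.empty)
        vals).getD t 0
      = Wcount (xs.reverse ++ p) t := by
  intro xs
  induction xs with
  | nil =>
    intro ns n0 vals p hch hv t ht
    have hns : ns = [] := by
      have := (ChainP_nil _).mp hch
      simpa using this
    subst hns
    simpa using hv t (by simpa using ht)
  | cons x xs ih =>
    intro ns n0 vals p hch hv t ht
    cases ns with
    | nil => exact absurd hch (ChainP_cons_sing x xs n0)
    | cons n1 rest =>
      obtain ⟨hl, hch'⟩ := (ChainP_cons_cons _ _ _ _ _).mp hch
      simp only [List.zip_cons_cons, List.foldl_cons]
      have hv' : ∀ u ∈ n1,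
          ((n1.foldl
            (fun nv t =>
              nv.insert t (PySem.Int.mod (vals.getD t 0 + (if x ≤ t then vals.getD (t - x) 0 else 0)) (10 ^ 9 + 7)))
            PySem.Dict.empty)).getD u 0 = Wcount (x :: p) u := by
        intro u hu
        rw [getD_foldl_insertg
          (fun t => PySem.Int.mod (vals.getD t 0 + (if x ≤ t then vals.getD (t - x) 0 else 0)) (10 ^ 9 + 7))
          n1 PySem.Dict.empty u, if_pos hu]
        have h1 := (hl u hu).1
        have h2 := (hl u hu).2
        rw [show Wcount (x :: p) u
            = PySem.Int.mod ((if x ≤ u then Wcount p (u - x) else 0) + Wcount p u) (10 ^ 9 + 7) from rfl]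
        rw [hv u h1]
        by_cases hx : x ≤ u
        · rw [if_pos hx, if_pos hx, hv (u - x) (h2 hx), Int.add_comm]
        · rw [if_neg hx, if_neg hx, Int.add_comm]
      have hlast : t ∈ (n1 :: rest).getLastD [] := by
        simpa [List.getLastD_cons] using ht
      have := ih (rest) n1 _ (x :: p) hch' hv' t hlast
      simpa [List.reverse_cons, List.append_assoc] using this

theorem b_guard (arr : List Int) (d : Int)
    (hG : arr.sum - d < 0 ∨ PySem.Int.mod (arr.sum - d) 2 ≠ 0) :
    countPartitionsBottomUp_alt arr d = 0 := by
  simp only [countPartitionsBottomUp_alt]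
  rw [if_pos hG]

theorem a_guard (arr : List Int) (d : Int)
    (hG : arr.sum - d < 0 ∨ PySem.Int.mod (arr.sum - d) 2 ≠ 0) :
    countPartitionsBottomUp arr d = 0 := by
  simp only [countPartitionsBottomUp]
  rw [if_pos hG]

theorem b_value (arr : List Int) (d : Int)
    (hG : ¬ (arr.sum - d < 0 ∨ PySem.Int.mod (arr.sum - d) 2 ≠ 0))
    (harr : arr ≠ [])
    (hnn : ∀ x ∈ arr, 0 ≤ x) :
    countPartitionsBottomUp_alt arr d
      = Wcount arr.reverse (PySem.Int.floordiv (arr.sum - d) 2) := by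
  obtain ⟨a0, rest, rfl⟩ := List.exists_cons_of_ne_nil harr
  simp only [countPartitionsBottomUp_alt]
  rw [if_neg hG]
  set arr := a0 :: rest with harrd
  set s2 := PySem.Int.floordiv (arr.sum - d) 2 with hs2d
  have hslice : PySem.List.slice arr (some 1) none = rest := by
    rw [PySem.List.slice_from_one, harrd]; rfl
  have ha0v : PySem.List.pyGetD arr 0 0 = a0 := by
    rw [harrd]; exact PySem.List.pyGetD_zero_cons a0 rest 0
  have hof : PySem.Set.ofList [s2] = [s2] :=
    PySem.Set.ofList_eq_self_of_nodup [s2] (List.nodup_singleton s2)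
  rw [hslice, ha0v, hof]
  have ha0 : 0 ≤ a0 := hnn a0 (by rw [harrd]; exact List.mem_cons_self)
  obtain ⟨hch, hne, hlastd⟩ := bwd rest.reverse [] [[s2]] (by simp) (by rw [ChainP_nil]; rfl)
  rw [List.reverse_reverse, List.append_nil] at hch
  set need := rest.reverse.foldl (fun need x =>
      ((need.headD []).foldl (fun prev t => if x ≤ t then PySem.Set.add prev (t - x) else prev)
        (need.headD [])) :: need)
    [[s2]] with hneedd
  obtain ⟨n0, ns, hcons⟩ := List.exists_cons_of_ne_nil hne
  rw [hcons] at hch hlastd ⊢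
  have hhead : (n0 :: ns).headD [] = n0 := rfl
  have hdrop : (n0 :: ns).drop 1 = ns := rfl
  rw [hhead, hdrop]
  have hv0 : ∀ t ∈ n0,
      ((n0.foldl
        (fun vals t =>
          vals.insert t (if a0 = 0 then (if t = 0 then (2 : Int) else 0) else (if t = 0 ∨ t = a0 then 1 else 0)))
        PySem.Dict.empty)).getD t 0 = Wcount [a0] t := by
    intro t ht
    rw [getD_foldl_insertg
      (fun t => if a0 = 0 then (if t = 0 then (2 : Int) else 0) else (if t = 0 ∨ t = a0 then 1 else 0))
      n0 PySem.Dict.empty t, if_pos ht]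
    exact base_eq a0 ha0 t
  have hs2mem : s2 ∈ (n0 :: ns).getLastD [] := by
    rw [hlastd]; simp
  have := fwd_all rest ns n0 _ [a0] hch hv0 s2 hs2mem
  rw [this]
  rw [harrd]
  simp

theorem seedW (a0 t : Int) (ht0 : 0 ≤ t) :
    Wcount [a0] t = if a0 ≠ 0 ∧ t = a0 then 1 else if t = 0 then (if a0 = 0 then 2 else 1) else 0 := by
  rw [show Wcount [a0] t = PySem.Int.mod
    ((if a0 ≤ t then (if t - a0 = 0 then 1 else 0) else 0) + (if t = 0 then 1 else 0))
    (10 ^ 9 + 7) from rfl]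
  rw [mod_id_of_bounds (by split_ifs <;> norm_num) (by split_ifs <;> norm_num)]
  split_ifs <;> omega

theorem size_pvASetD {α : Type} (xs : Array α) (i : Int) (v : α) :
    (pvASetD xs i v).size = xs.size := by
  unfold pvASetD
  dsimp only
  split <;> split <;> simp [Array.size_setIfInBounds]

theorem pvAGetD_nonneg_lt {α : Type} (xs : Array α) (i : Int) (d : α)
    (h0 : 0 ≤ i) (hlt : i.toNat < xs.size) : pvAGetD xs i d = xs[i.toNat]'hlt := by
  unfold pvAGetD
  dsimp only
  simp only [if_neg (show ¬ i < 0 by omega)]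
  rw [dif_pos ⟨h0, hlt⟩]

theorem pvAGetD_default {α : Type} (xs : Array α) (i : Int) (d : α)
    (h0 : 0 ≤ i) (hge : ¬ i.toNat < xs.size) : pvAGetD xs i d = d := by
  unfold pvAGetD
  dsimp only
  simp only [if_neg (show ¬ i < 0 by omega)]
  rw [dif_neg (by omega)]

theorem pvAGetD_pvASetD {α : Type} (xs : Array α) (i j : Int) (v d : α)
    (hi : 0 ≤ i) (hin : i.toNat < xs.size) (hj : 0 ≤ j) :
    pvAGetD (pvASetD xs i v) j d = if j = i then v else pvAGetD xs j d := by
  have hset : pvASetD xs i v = xs.setIfInBounds i.toNat v := by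
    unfold pvASetD
    dsimp only
    rw [if_neg (show ¬ i < 0 by omega), if_pos ⟨hi, hin⟩]
  rw [hset]
  by_cases hjn : j.toNat < xs.size
  · rw [pvAGetD_nonneg_lt _ _ _ hj (by rw [Array.size_setIfInBounds]; exact hjn),
      Array.getElem_setIfInBounds hjn]
    by_cases hji : j = i
    · rw [if_pos (by omega), if_pos hji]
    · rw [if_neg (by omega), if_neg hji, pvAGetD_nonneg_lt xs j d hj hjn]
  · rw [pvAGetD_default _ _ _ hj (by rw [Array.size_setIfInBounds]; exact hjn),
      if_neg (show ¬ j = i by omega), pvAGetD_default xs j d hj hjn]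

theorem pvAGetD_replicate {α : Type} (m : Nat) (r : α) (j : Int) (d : α)
    (h0 : 0 ≤ j) (hj : j.toNat < m) : pvAGetD (Array.replicate m r) j d = r := by
  rw [pvAGetD_nonneg_lt _ _ _ h0 (by rw [Array.size_replicate]; exact hj)]
  exact Array.getElem_replicate _

theorem pvAGetD_replicate0 (m : Nat) (t : Int) (h0 : 0 ≤ t) :
    pvAGetD (Array.replicate m (0 : Int)) t 0 = 0 := by
  by_cases h : t.toNat < m
  · exact pvAGetD_replicate m 0 t 0 h0 h
  · exact pvAGetD_default _ t 0 h0 (by rw [Array.size_replicate]; exact h)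

theorem row_fill (s2 : Int) (f : Int → Int) :
    ∀ (k : Nat) (v : Int) (row : Array Int), (s2 + 1 - v).toNat = k → 0 ≤ v →
    row.size = (s2 + 1).toNat →
    ((PySem.List.pyRange v (s2 + 1) 1).foldl
        (fun row t => pvASetD row t (f t)) row).size = (s2 + 1).toNat ∧
    ∀ t : Int, 0 ≤ t → t ≤ s2 →
      pvAGetD ((PySem.List.pyRange v (s2 + 1) 1).foldl
          (fun row t => pvASetD row t (f t)) row) t 0
        = if v ≤ t then f t else pvAGetD row t 0 := by
  intro k
  induction k with
  | zero =>
    intro v row hk hv hlen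
    rw [PySem.List.pyRange_one_eq_nil (by omega)]
    refine ⟨hlen, ?_⟩
    intro t ht0 hts
    rw [if_neg (by omega)]
    rfl
  | succ k ih =>
    intro v row hk hv hlen
    have hvlt : v < s2 + 1 := by omega
    rw [PySem.List.pyRange_one_cons hvlt]
    simp only [List.foldl_cons]
    have hlen' : (pvASetD row v (f v)).size = (s2 + 1).toNat := by
      rw [size_pvASetD]; exact hlen
    have hvnat : v.toNat < row.size := by omega
    obtain ⟨hL, hV⟩ := ih (v + 1) (pvASetD row v (f v)) (by omega) (by omega) hlen'
    refine ⟨hL, ?_⟩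
    intro t ht0 hts
    rw [hV t ht0 hts]
    by_cases hvt : v ≤ t
    · rw [if_pos hvt]
      by_cases htv : t = v
      · subst htv
        rw [if_neg (by omega)]
        rw [pvAGetD_pvASetD row t t (f t) 0 (by omega) hvnat ht0, if_pos rfl]
      · rw [if_pos (by omega)]
    · rw [if_neg hvt, if_neg (by omega)]
      rw [pvAGetD_pvASetD row v t (f v) 0 hv hvnat ht0, if_neg (by omega)]

theorem getI_arr (arr : List Int) (i : Int) (h0 : 0 ≤ i) (hlt : i.toNat < arr.length) :
    pvGetI arr i = arr[i.toNat] := by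
  unfold pvGetI
  rw [PySem.List.pyGetD_of_nonneg _ _ h0, List.getD_eq_getElem?_getD,
    List.getElem?_eq_getElem hlt]
  rfl

theorem a_fold (arr : List Int) (s2 : Int) (hs2 : 0 ≤ s2) (hnn : ∀ x ∈ arr, 0 ≤ x) :
    ∀ (k : Nat) (i : Int) (dp : Array (Array Int)),
    ((arr.length : Int) - i).toNat = k → 1 ≤ i → i ≤ (arr.length : Int) →
    dp.size = arr.length →
    (∀ j : Int, 0 ≤ j → j < (arr.length : Int) → (pvAGetD dp j #[]).size = (s2 + 1).toNat) →
    (∀ t : Int, 0 ≤ t → t ≤ s2 →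
      pvAGetD (pvAGetD dp (i - 1) #[]) t 0 = Wcount ((arr.take i.toNat).reverse) t) →
    ∀ t : Int, 0 ≤ t → t ≤ s2 →
    pvAGetD (pvAGetD ((PySem.List.pyRange i (arr.length : Int) 1).foldl (fun dp i =>
        pvASetD dp i
          ((PySem.List.pyRange 0 (s2 + 1) 1).foldl (fun row target =>
            pvASetD row target
              (PySem.Int.mod
                ((if pvGetI arr i ≤ target then pvAGetD (pvAGetD dp (i - 1) #[]) (target - pvGetI arr i) 0 else 0)
                  + pvAGetD (pvAGetD dp (i - 1) #[]) target 0) (10 ^ 9 + 7)))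
          (pvAGetD dp i #[]))) dp) ((arr.length : Int) - 1) #[]) t 0 = Wcount arr.reverse t := by
  intro k
  induction k with
  | zero =>
    intro i dp hk h1 h2 hdl hrl hval t ht0 hts
    have hie : i = (arr.length : Int) := by omega
    subst hie
    rw [show PySem.List.pyRange (arr.length : Int) (arr.length : Int) 1 = [] from
      PySem.List.pyRange_one_eq_nil le_rfl]
    simp only [List.foldl_nil]
    have : arr.take (arr.length : Int).toNat = arr := by simp
    rw [hval t ht0 hts, this]
  | succ k ih =>
    intro i dp hk h1 h2 hdl hrl hval t ht0 hts
    have hilt : i < (arr.length : Int) := by omega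
    have hinat : i.toNat < arr.length := by omega
    have hidp : i.toNat < dp.size := by omega
    rw [PySem.List.pyRange_one_cons hilt]
    simp only [List.foldl_cons]
    set ai := pvGetI arr i with hai
    have haim : arr[i.toNat] ∈ arr := List.getElem_mem _
    have hai0 : 0 ≤ ai := by rw [hai, getI_arr arr i (by omega) hinat]; exact hnn _ haim
    set prevRow := pvAGetD dp (i - 1) #[] with hprev
    set f : Int → Int := fun target =>
      PySem.Int.mod
        ((if ai ≤ target then pvAGetD prevRow (target - ai) 0 else 0) + pvAGetD prevRow target 0)
        (10 ^ 9 + 7) with hf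
    have hfW : ∀ t : Int, 0 ≤ t → t ≤ s2 → f t = Wcount (ai :: (arr.take i.toNat).reverse) t := by
      intro t ht0 hts
      rw [show Wcount (ai :: (arr.take i.toNat).reverse) t =
        PySem.Int.mod ((if ai ≤ t then Wcount ((arr.take i.toNat).reverse) (t - ai) else 0)
          + Wcount ((arr.take i.toNat).reverse) t) (10 ^ 9 + 7) from rfl]
      rw [hf]
      dsimp only
      rw [hval t ht0 hts]
      by_cases hle : ai ≤ t
      · rw [if_pos hle, if_pos hle, hval (t - ai) (by omega) (by omega)]
      · rw [if_neg hle, if_neg hle]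
    obtain ⟨hnrL, hnrV⟩ := row_fill s2 f (s2 + 1).toNat 0
      (pvAGetD dp i #[]) (by omega) le_rfl (hrl i (by omega) hilt)
    set newRow := (PySem.List.pyRange 0 (s2 + 1) 1).foldl
      (fun row t => pvASetD row t (f t)) (pvAGetD dp i #[]) with hnr
    have hrow' : ∀ j : Int, 0 ≤ j →
        pvAGetD (pvASetD dp i newRow) j #[] = if j = i then newRow else pvAGetD dp j #[] :=
      fun j hj => pvAGetD_pvASetD dp i j newRow #[] (by omega) hidp hj
    have htake : (arr.take (i + 1).toNat).reverse = ai :: (arr.take i.toNat).reverse := by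
      have : (i + 1).toNat = i.toNat + 1 := by omega
      rw [this, List.take_succ_eq_append_getElem hinat, List.reverse_append]
      rw [hai, getI_arr arr i (by omega) hinat]
      rfl
    refine ih (i + 1) (pvASetD dp i newRow) (by omega) (by omega) (by omega) ?_ ?_ ?_ t ht0 hts
    · rw [size_pvASetD]; exact hdl
    · intro j hj0 hjlt
      rw [hrow' j hj0]
      by_cases hji : j = i
      · rw [if_pos hji]; exact hnrL
      · rw [if_neg hji]; exact hrl j hj0 hjlt
    · intro t ht0 hts
      have : i + 1 - 1 = i := by omega
      rw [this, hrow' i (by omega), if_pos rfl, hnr]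
      rw [hnrV t ht0 hts, if_pos ht0, hfW t ht0 hts, htake]

theorem a_value (arr : List Int) (d : Int)
    (hG : ¬ (arr.sum - d < 0 ∨ PySem.Int.mod (arr.sum - d) 2 ≠ 0))
    (harr : arr ≠ [])
    (hnn : ∀ x ∈ arr, 0 ≤ x)
    (hs2 : 0 ≤ PySem.Int.floordiv (arr.sum - d) 2) :
    countPartitionsBottomUp arr d
      = Wcount arr.reverse (PySem.Int.floordiv (arr.sum - d) 2) := by
  obtain ⟨a0, rest, rfl⟩ := List.exists_cons_of_ne_nil harr
  simp only [countPartitionsBottomUp]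
  rw [if_neg hG]
  set arr := a0 :: rest with harrd
  set s2 := PySem.Int.floordiv (arr.sum - d) 2 with hs2d
  have ha0v : pvGetI arr 0 = a0 := by
    unfold pvGetI; rw [harrd]; exact PySem.List.pyGetD_zero_cons a0 rest 0
  have ha0 : 0 ≤ a0 := hnn a0 (by rw [harrd]; exact List.mem_cons_self)
  have hlenpos : 0 < arr.length := by rw [harrd]; simp
  rw [ha0v]
  set M : Nat := ((arr.length : Int)).toNat with hM
  have hMl : M = arr.length := by omega
  set r0 : Array Int := Array.replicate (s2 + 1).toNat 0 with hr0
  have hr0l : r0.size = (s2 + 1).toNat := by rw [hr0]; exact Array.size_replicate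
  have hdp00 : pvAGetD (Array.replicate M r0) 0 #[] = r0 :=
    pvAGetD_replicate M r0 0 #[] le_rfl (by omega)
  rw [hdp00]
  set rowA : Array Int := pvASetD r0 0 (if a0 = 0 then 2 else 1) with hrowA
  have hrowAl : rowA.size = (s2 + 1).toNat := by
    rw [hrowA, size_pvASetD]; exact hr0l
  set dp1 : Array (Array Int) := pvASetD (Array.replicate M r0) 0 rowA with hdp1
  have hdp0l : (Array.replicate M r0).size = M := Array.size_replicate
  have hdp1l : dp1.size = arr.length := by
    rw [hdp1, size_pvASetD, hdp0l, hMl]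
  have hdp10 : pvAGetD dp1 0 #[] = rowA := by
    rw [hdp1, pvAGetD_pvASetD _ 0 0 rowA #[] le_rfl (by omega) le_rfl, if_pos rfl]
  rw [hdp10]
  set rowB : Array Int := pvASetD rowA a0 1 with hrowB
  set dp2 : Array (Array Int) :=
    if a0 ≠ 0 ∧ a0 ≤ s2 then pvASetD dp1 0 rowB else dp1 with hdp2
  have hdp2l : dp2.size = arr.length := by
    rw [hdp2]; split
    · rw [size_pvASetD]; exact hdp1l
    · exact hdp1l
  have hdp1row : ∀ j : Int, 0 ≤ j → j < (arr.length : Int) →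
      pvAGetD dp1 j #[] = if j = 0 then rowA else r0 := by
    intro j hj0 hjl
    rw [hdp1, pvAGetD_pvASetD _ 0 j rowA #[] le_rfl (by omega) hj0]
    by_cases hj : j = 0
    · rw [if_pos hj, if_pos hj]
    · rw [if_neg hj, if_neg hj]
      exact pvAGetD_replicate M r0 j #[] hj0 (by omega)
  have hdp2row : ∀ j : Int, 0 ≤ j → j < (arr.length : Int) →
      pvAGetD dp2 j #[] = if j = 0 then (if a0 ≠ 0 ∧ a0 ≤ s2 then rowB else rowA) else r0 := by
    intro j hj0 hjl
    rw [hdp2]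
    by_cases hc : a0 ≠ 0 ∧ a0 ≤ s2
    · rw [if_pos hc]
      rw [pvAGetD_pvASetD _ 0 j rowB #[] le_rfl (by rw [hdp1, size_pvASetD]; omega) hj0]
      by_cases hj : j = 0
      · rw [if_pos hj, if_pos hj, if_pos hc]
      · rw [if_neg hj, if_neg hj]
        have := hdp1row j hj0 hjl
        rw [if_neg hj] at this
        exact this
    · rw [if_neg hc]
      rw [hdp1row j hj0 hjl]
      by_cases hj : j = 0
      · rw [if_pos hj, if_pos hj, if_neg hc]
      · rw [if_neg hj, if_neg hj]
  have hrowAv : ∀ t : Int, 0 ≤ t → t ≤ s2 →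
      pvAGetD rowA t 0 = if t = 0 then (if a0 = 0 then 2 else 1) else 0 := by
    intro t ht0 hts
    rw [hrowA, pvAGetD_pvASetD r0 0 t _ 0 le_rfl (by omega) ht0]
    by_cases ht : t = 0
    · rw [if_pos ht, if_pos ht]
    · rw [if_neg ht, if_neg ht, hr0]
      exact pvAGetD_replicate0 _ t ht0
  have hrow0 : ∀ t : Int, 0 ≤ t → t ≤ s2 →
      pvAGetD (pvAGetD dp2 0 #[]) t 0 = Wcount [a0] t := by
    intro t ht0 hts
    rw [hdp2row 0 le_rfl (by omega), if_pos rfl, seedW a0 t ht0]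
    by_cases hc : a0 ≠ 0 ∧ a0 ≤ s2
    · rw [if_pos hc, hrowB, pvAGetD_pvASetD rowA a0 t 1 0 ha0 (by omega) ht0]
      by_cases hta : t = a0
      · rw [if_pos hta, if_pos ⟨hc.1, hta⟩]
      · rw [if_neg hta, if_neg (by tauto)]
        exact hrowAv t ht0 hts
    · rw [if_neg hc, hrowAv t ht0 hts]
      have : ¬ (a0 ≠ 0 ∧ t = a0) := by
        intro h
        exact hc ⟨h.1, by omega⟩
      rw [if_neg this]
  have htake1 : (arr.take (1 : Int).toNat).reverse = [a0] := by
    rw [harrd]; rfl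
  refine a_fold arr s2 hs2 hnn ((arr.length : Int) - 1).toNat 1 dp2 (by omega) le_rfl
    (by omega) hdp2l ?_ ?_ s2 hs2 le_rfl
  · intro j hj0 hjl
    rw [hdp2row j hj0 hjl]
    by_cases hj : j = 0
    · rw [if_pos hj]
      split
      · rw [hrowB, size_pvASetD]; exact hrowAl
      · exact hrowAl
    · rw [if_neg hj]; exact hr0l
  · intro t ht0 hts
    rw [show (1 : Int) - 1 = 0 by omega, htake1]
    exact hrow0 t ht0 hts

-- ===== VERDICT (by name: the statement is the Claim_ definition above) =====
theorem countPartitionsBottomUp_spec : Claim_equal_countPartitionsBottomUp := by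
  intro arr d _ hpre
  unfold Spec_countPartitionsBottomUp
  by_cases hG : arr.sum - d < 0 ∨ PySem.Int.mod (arr.sum - d) 2 ≠ 0
  · rw [a_guard arr d hG, b_guard arr d hG]
  · have hpre' : arr ≠ [] ∧ ∀ x ∈ arr, 0 ≤ x := by
      unfold Pre_countPartitionsBottomUp at hpre
      tauto
    have hsum : 0 ≤ arr.sum - d := by
      by_contra h
      exact hG (Or.inl (by omega))
    have hs2 : 0 ≤ PySem.Int.floordiv (arr.sum - d) 2 := by
      rw [PySem.Int.le_floordiv_iff_mul_le (by norm_num)]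
      omega
    rw [a_value arr d hG hpre'.1 hpre'.2 hs2, b_value arr d hG hpre'.1 hpre'.2]
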